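-- pv_equiv track=rewrite | github.com/SuyeshJadhav/JobAgent | backend/services/profile_rag.py | _match_fast_path
-- ===== SOURCE A (Python) =====
-- def _match_fast_path(field_name: str, fast_map: dict[str, str]) -> str | None:
--     """
--     Check if a field name matches any fast-path keyword.
--     Returns the answer if matched, None otherwise.
--     """
--     field_lower = field_name.lower()
--
--     # Priority 1: Exact match (normalized)
--     norm_field = field_lower.replace("_", " ").replace("-", " ")
--     if norm_field in fast_map:
--         return fast_map[norm_field]
--
--     # Priority 2: Keyword containment (longest keyword first)
--     sorted_keys = sorted(fast_map.keys(), key=len, reverse=True)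
--     for keyword in sorted_keys:
--         if keyword in norm_field:
--             return fast_map[keyword]
--
--     return None
-- ===== SOURCE B (Python) =====
-- def _match_fast_path(field_name: str, fast_map: dict[str, str]) -> str | None:
--     # One pass over the items: keep the first pair whose key is contained in the
--     # normalized field and is strictly longer than the best so far.  The exact-match
--     # phase of the original is subsumed: the normalized field itself is the unique
--     # longest key that can be contained in it.
--     norm_field = field_name.lower().replace("_", " ").replace("-", " ")
--     best = None
--     for k, v in fast_map.items():
--         if (best is None or len(best[0]) < len(k)) and k in norm_field:
--             best = (k, v)
--     return best[1] if best is not None else None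
-- ===== Notes on version B (the rewrite author's own statement) =====
-- stated objective: simpler
-- what changed: Replaced A's two phases (exact-match dict lookup, then sort-keys-by-length-descending and scan with a second dict lookup) by a single fold over the items that keeps the first pair whose contained key is strictly longer than the best so far; the exact-match phase is subsumed because the normalized field is the unique longest key containable in itself.
import Mathlib
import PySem

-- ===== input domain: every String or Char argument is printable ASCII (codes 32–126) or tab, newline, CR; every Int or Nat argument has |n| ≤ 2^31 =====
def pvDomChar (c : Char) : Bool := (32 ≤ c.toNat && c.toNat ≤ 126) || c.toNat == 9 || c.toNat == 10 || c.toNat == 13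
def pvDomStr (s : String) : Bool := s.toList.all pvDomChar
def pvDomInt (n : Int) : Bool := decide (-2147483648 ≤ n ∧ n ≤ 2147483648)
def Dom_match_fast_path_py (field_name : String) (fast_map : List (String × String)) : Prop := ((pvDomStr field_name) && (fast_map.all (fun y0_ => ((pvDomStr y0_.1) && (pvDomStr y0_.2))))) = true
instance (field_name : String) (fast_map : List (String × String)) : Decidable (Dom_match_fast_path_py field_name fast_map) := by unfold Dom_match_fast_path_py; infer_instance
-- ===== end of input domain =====

-- B replaces A's two phases (exact-match branch + sort-by-length-then-scan + dict lookup) with one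
-- fold over the items that keeps the first strictly-longer contained key (simpler, single pass).
-- ===== PORT A =====
def match_fast_path_py (field_name : String) (fast_map : List (String × String)) : Option String :=
  let fieldLower := PySem.Str.lower field_name
  let normField := PySem.Str.replace (PySem.Str.replace fieldLower "_" " ") "-" " "
  if (fast_map.map Prod.fst).contains normField then
    (fast_map.find? (fun p => p.1 == normField)).map Prod.snd
  else
    let sortedKeys := PySem.List.sorted (fast_map.map Prod.fst) (fun k => k.length) true
    match sortedKeys.find? (fun k => PySem.Str.isIn k normField) with
    | some keyword => (fast_map.find? (fun p => p.1 == keyword)).map Prod.snd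
    | none => none

-- ===== PORT B =====
def match_fast_path_py_alt (field_name : String) (fast_map : List (String × String)) : Option String :=
  let normField := PySem.Str.replace (PySem.Str.replace (PySem.Str.lower field_name) "_" " ") "-" " "
  let best := fast_map.foldl
    (fun (acc : Option (String × String)) p =>
      if (match acc with
          | none => true
          | some q => decide (q.1.length < p.1.length)) && PySem.Str.isIn p.1 normField
      then some p else acc)
    none
  best.map Prod.snd

-- ===== PRECONDITION & SPEC =====
def Spec_match_fast_path_py (field_name : String) (fast_map : List (String × String)) (out : Option String) : Prop := out = match_fast_path_py_alt field_name fast_map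
instance (field_name : String) (fast_map : List (String × String)) (out : Option String) : Decidable (Spec_match_fast_path_py field_name fast_map out) := by unfold Spec_match_fast_path_py; infer_instance

-- ===== CLAIM (what is proved, stated in full; the proofs are below) =====
def Claim_equal_match_fast_path_py : Prop := ∀ (field_name : String) (fast_map : List (String × String)), Dom_match_fast_path_py field_name fast_map → Spec_match_fast_path_py field_name fast_map (match_fast_path_py field_name fast_map)

-- ===== LEMMAS AND PROOFS =====

-- the running "first maximal" step of a reverse-sorted find?
def maxStep (key : String → Nat) (acc : Option String) (x : String) : Option String :=
  match acc with
  | none => some x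
  | some m => if key m < key x then some x else some m

-- B's fold step, abstracted over the containment predicate
def bStep (P : String → Bool) (acc : Option (String × String)) (p : String × String) : Option (String × String) :=
  if (match acc with
      | none => true
      | some q => decide (q.1.length < p.1.length)) && P p.1
  then some p else acc

lemma pairwise_insertBy (key : String → Nat) (x : String) (acc : List String)
    (h : acc.Pairwise (fun a b => key b ≤ key a)) :
    (PySem.List.insertBy (fun a b => decide (key b < key a)) x acc).Pairwise (fun a b => key b ≤ key a) := by
  induction acc with
  | nil => simp [PySem.List.insertBy]
  | cons y ys ih =>
    rcases List.pairwise_cons.mp h with ⟨hy, hys⟩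
    by_cases hb : key y < key x
    · simp only [PySem.List.insertBy, hb, decide_true, if_true]
      refine List.pairwise_cons.mpr ⟨?_, h⟩
      intro z hz
      rcases List.mem_cons.mp hz with rfl | hz
      · exact le_of_lt hb
      · exact le_trans (hy z hz) (le_of_lt hb)
    · simp only [PySem.List.insertBy, hb, decide_false, Bool.false_eq_true, if_false]
      refine List.pairwise_cons.mpr ⟨?_, ih hys⟩
      intro z hz
      rcases (PySem.List.mem_insertBy _ _ _ _).mp hz with rfl | hz
      · omega
      · exact hy z hz

lemma find?_insertBy (P : String → Bool) (key : String → Nat) (x : String) (acc : List String)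
    (h : acc.Pairwise (fun a b => key b ≤ key a)) :
    (PySem.List.insertBy (fun a b => decide (key b < key a)) x acc).find? P
      = if P x then maxStep key (acc.find? P) x else acc.find? P := by
  induction acc with
  | nil =>
    by_cases hp : P x <;>
      simp [PySem.List.insertBy, hp, maxStep]
  | cons y ys ih =>
    rcases List.pairwise_cons.mp h with ⟨hy, hys⟩
    by_cases hb : key y < key x
    · simp only [PySem.List.insertBy, hb, decide_true, if_true]
      by_cases hp : P x
      · rw [if_pos hp, List.find?_cons_of_pos hp]
        cases hm : (y :: ys).find? P with
        | none => rfl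
        | some m =>
          have hmem : m ∈ y :: ys := List.mem_of_find?_eq_some hm
          have hle : key m ≤ key y := by
            rcases List.mem_cons.mp hmem with rfl | hmm
            · exact le_refl _
            · exact hy m hmm
          simp only [maxStep]
          rw [if_pos (lt_of_le_of_lt hle hb)]
      · rw [if_neg hp, List.find?_cons_of_neg hp]
    · simp only [PySem.List.insertBy, hb, decide_false, Bool.false_eq_true, if_false]
      by_cases hpy : P y
      · have hfy : (y :: ys).find? P = some y := List.find?_cons_of_pos hpy
        rw [List.find?_cons_of_pos hpy, hfy]
        by_cases hp : P x
        · rw [if_pos hp]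
          simp only [maxStep]
          rw [if_neg (by omega)]
        · rw [if_neg hp]
      · rw [List.find?_cons_of_neg hpy, List.find?_cons_of_neg hpy]
        exact ih hys

lemma find?_foldl_insertBy (P : String → Bool) (key : String → Nat) (xs : List String)
    (acc : List String) (h : acc.Pairwise (fun a b => key b ≤ key a)) :
    (xs.foldl (fun acc x => PySem.List.insertBy (fun a b => decide (key b < key a)) x acc) acc).find? P
      = xs.foldl (fun o x => if P x then maxStep key o x else o) (acc.find? P) := by
  induction xs generalizing acc with
  | nil => rfl
  | cons x xs ih =>
    simp only [List.foldl_cons]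
    rw [ih _ (pairwise_insertBy key x acc h), find?_insertBy P key x acc h]

lemma find?_sorted_rev_eq_foldl (P : String → Bool) (key : String → Nat) (xs : List String) :
    (PySem.List.sorted xs key true).find? P
      = xs.foldl (fun o x => if P x then maxStep key o x else o) none := by
  have h := find?_foldl_insertBy P key xs [] (List.Pairwise.nil)
  simpa [PySem.List.sorted] using h

-- B's fold projects (via the key) onto the reverse-sorted-scan fold
lemma bFold_map_fst (P : String → Bool) (xs : List (String × String))
    (acc : Option (String × String)) :
    (xs.foldl (bStep P) acc).map Prod.fst
      = (xs.map Prod.fst).foldl (fun o k => if P k then maxStep String.length o k else o)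
          (acc.map Prod.fst) := by
  induction xs generalizing acc with
  | nil => rfl
  | cons x xs ih =>
    simp only [List.map_cons, List.foldl_cons]
    rw [ih]
    congr 1
    cases acc with
    | none =>
      by_cases hp : P x.1 <;> simp [bStep, hp, maxStep]
    | some q =>
      by_cases hp : P x.1
      · by_cases hl : q.1.length < x.1.length <;>
          simp [bStep, hp, hl, maxStep]
      · simp [bStep, hp]

lemma bFold_some_of_some (P : String → Bool) (xs : List (String × String))
    (q r : String × String) (h : xs.foldl (bStep P) (some q) = some r) :
    r = q ∨ (P r.1 = true ∧ q.1.length < r.1.length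
      ∧ xs.find? (fun p => p.1 == r.1) = some r) := by
  induction xs generalizing q with
  | nil =>
    left; exact (Option.some_inj.mp h).symm
  | cons x xs ih =>
    simp only [List.foldl_cons] at h
    by_cases hc : (decide (q.1.length < x.1.length) && P x.1) = true
    · rw [show bStep P (some q) x = some x by simp [bStep, hc]] at h
      have hc' := hc
      simp only [Bool.and_eq_true, decide_eq_true_eq] at hc'
      obtain ⟨hl, hp⟩ := hc'
      rcases ih x h with rfl | ⟨hpr, hlr, hfind⟩
      · right
        refine ⟨hp, hl, ?_⟩
        rw [List.find?_cons_of_pos (by simp)]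
      · right
        refine ⟨hpr, lt_trans hl hlr, ?_⟩
        rw [List.find?_cons_of_neg, hfind]
        simp only [beq_iff_eq]
        intro hEq
        rw [hEq] at hlr
        omega
    · rw [show bStep P (some q) x = some q by simp [bStep]; intro h1 h2; exact absurd (by simp [h1, h2]) hc] at h
      rcases ih q h with rfl | ⟨hpr, hlr, hfind⟩
      · exact Or.inl rfl
      · right
        refine ⟨hpr, hlr, ?_⟩
        rw [List.find?_cons_of_neg, hfind]
        simp only [beq_iff_eq]
        intro hEq
        apply hc
        simp only [hEq, hpr, Bool.and_true, decide_eq_true_eq]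
        omega

lemma bFold_ne_none (P : String → Bool) (xs : List (String × String)) (q : String × String) :
    xs.foldl (bStep P) (some q) ≠ none := by
  induction xs generalizing q with
  | nil => simp
  | cons x xs ih =>
    simp only [List.foldl_cons, bStep]
    split
    · exact ih x
    · exact ih q

lemma bFold_none_find (P : String → Bool) (xs : List (String × String)) (r : String × String)
    (h : xs.foldl (bStep P) none = some r) :
    P r.1 = true ∧ xs.find? (fun p => p.1 == r.1) = some r := by
  induction xs with
  | nil => simp at h
  | cons x xs ih =>
    simp only [List.foldl_cons] at h
    by_cases hp : P x.1
    · rw [show bStep P none x = some x by simp [bStep, hp]] at h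
      rcases bFold_some_of_some P xs x r h with rfl | ⟨hpr, hlr, hfind⟩
      · exact ⟨hp, by rw [List.find?_cons_of_pos (by simp)]⟩
      · refine ⟨hpr, ?_⟩
        rw [List.find?_cons_of_neg, hfind]
        simp only [beq_iff_eq]
        intro hEq
        rw [hEq] at hlr
        omega
    · rw [show bStep P none x = none by simp [bStep, hp]] at h
      rcases ih h with ⟨hpr, hfind⟩
      refine ⟨hpr, ?_⟩
      rw [List.find?_cons_of_neg, hfind]
      simp only [beq_iff_eq]
      intro hEq
      rw [hEq, hpr] at hp
      exact hp rfl

lemma bFold_max (P : String → Bool) (xs : List (String × String))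
    (acc : Option (String × String)) (r : String × String)
    (h : xs.foldl (bStep P) acc = some r) :
    ∀ p ∈ xs, P p.1 = true → p.1.length ≤ r.1.length := by
  have len_le : ∀ (ys : List (String × String)) (q s : String × String),
      ys.foldl (bStep P) (some q) = some s → q.1.length ≤ s.1.length := by
    intro ys q s hqs
    rcases bFold_some_of_some P ys q s hqs with rfl | ⟨_, hlt, _⟩
    · exact le_refl _
    · exact le_of_lt hlt
  induction xs generalizing acc with
  | nil => intro p hp; simp at hp
  | cons x xs ih =>
    simp only [List.foldl_cons] at h
    intro p hp hpP
    rcases List.mem_cons.mp hp with rfl | hmem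
    · cases acc with
      | none =>
        rw [show bStep P none p = some p by simp [bStep, hpP]] at h
        exact len_le _ _ _ h
      | some q =>
        by_cases hl : q.1.length < p.1.length
        · rw [show bStep P (some q) p = some p by simp [bStep, hl, hpP]] at h
          exact len_le _ _ _ h
        · rw [show bStep P (some q) p = some q by simp [bStep, hl]] at h
          exact le_trans (by omega) (len_le _ _ _ h)
    · exact ih _ h p hmem hpP

lemma bFold_eq_none (P : String → Bool) (xs : List (String × String))
    (h : xs.foldl (bStep P) none = none) : ∀ p ∈ xs, P p.1 = false := by
  induction xs with
  | nil => simp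
  | cons x xs ih =>
    simp only [List.foldl_cons] at h
    by_cases hp : P x.1
    · rw [show bStep P none x = some x by simp [bStep, hp]] at h
      exact absurd h (bFold_ne_none P xs x)
    · rw [show bStep P none x = none by simp [bStep, hp]] at h
      intro p hpmem
      rcases List.mem_cons.mp hpmem with rfl | hmem
      · exact Bool.not_eq_true _ |>.mp hp
      · exact ih h p hmem

-- ===== VERDICT (by name: the statement is the Claim_ definition above) =====
theorem match_fast_path_py_spec : Claim_equal_match_fast_path_py := by
  intro field_name fast_map _
  unfold Spec_match_fast_path_py
  simp only [match_fast_path_py, match_fast_path_py_alt]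
  set normField := PySem.Str.replace (PySem.Str.replace (PySem.Str.lower field_name) "_" " ") "-" " " with hnf
  have hfold : fast_map.foldl
      (fun (acc : Option (String × String)) p =>
        if (match acc with
            | none => true
            | some q => decide (q.1.length < p.1.length)) && PySem.Str.isIn p.1 normField
        then some p else acc) none
      = fast_map.foldl (bStep (fun k => PySem.Str.isIn k normField)) none := rfl
  rw [hfold]
  have h2 : (PySem.List.sorted (fast_map.map Prod.fst) (fun k => k.length) true).find?
        (fun k => PySem.Str.isIn k normField)
      = (fast_map.foldl (bStep (fun k => PySem.Str.isIn k normField)) none).map Prod.fst := by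
    rw [find?_sorted_rev_eq_foldl, bFold_map_fst]
    rfl
  have isin_refl : PySem.Str.isIn normField normField = true := by
    simp [PySem.Str.isIn, PySem.Chars.isIn_iff_infix]
  have isin_eq : ∀ k : String, PySem.Str.isIn k normField = true →
      normField.length ≤ k.length → k = normField := by
    intro k hk hlen
    have hinf := (PySem.Chars.isIn_iff_infix _ _).mp hk
    have hl1 : k.toList.length ≤ normField.toList.length := hinf.length_le
    have hl2 : normField.toList.length ≤ k.toList.length := by simpa using hlen
    have : k.toList = normField.toList := hinf.sublist.eq_of_length (by omega)
    exact String.toList_inj.mp this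
  cases hms : fast_map.foldl (bStep (fun k => PySem.Str.isIn k normField)) none with
  | none =>
    have hnomatch := bFold_eq_none _ _ hms
    have hc : (fast_map.map Prod.fst).contains normField = false := by
      by_contra hcc
      have hmem : normField ∈ fast_map.map Prod.fst := by
        simpa using Bool.not_eq_false _ |>.mp hcc
      obtain ⟨p0, hp0mem, hp0eq⟩ := List.mem_map.mp hmem
      have := hnomatch p0 hp0mem
      rw [hp0eq, isin_refl] at this
      exact Bool.true_eq_false.mp this
    rw [hms] at h2
    rw [if_neg (by rw [hc]; exact Bool.false_ne_true), h2]
    rfl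
  | some r =>
    obtain ⟨hPr, hfind⟩ := bFold_none_find _ _ _ hms
    rw [hms] at h2
    simp only [Option.map_some] at h2
    by_cases hc : ((fast_map.map Prod.fst).contains normField) = true
    · have hmem : normField ∈ fast_map.map Prod.fst := by simpa using hc
      obtain ⟨p0, hp0mem, hp0eq⟩ := List.mem_map.mp hmem
      have hge : normField.length ≤ r.1.length := by
        have := bFold_max _ _ _ _ hms p0 hp0mem (by rw [hp0eq]; exact isin_refl)
        rw [hp0eq] at this
        exact this
      have hr1 : r.1 = normField := isin_eq r.1 hPr hge
      rw [if_pos hc, ← hr1, hfind]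
    · rw [if_neg hc, h2]
      simp [hfind]
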